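-- pv_equiv track=rewrite | github.com/HaleKim/Algorithm_Study | 신경민/dongbinna/Greedy/gridi_test_01.py | wone
-- ===== SOURCE A (Python) =====
-- def wone(n,k):
--     cnt = 0
--     while(True):
--         if n % k == 0:
--             cnt+=(n//k)
--             break
--         else:
--             n-=1
--             cnt+=1
--     return cnt
-- ===== SOURCE B (Python) =====
-- def wone(n, k):
--     s = n % abs(k)          # decrements needed until k divides n
--     return s + (n - s) // k
-- ===== Notes on version B (the rewrite author's own statement) =====
-- stated objective: faster
-- what changed: Replaces A's decrement-by-one loop (n mod |k| iterations) with the O(1) closed form s = n % abs(k); return s + (n - s) // k.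
import Mathlib
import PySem

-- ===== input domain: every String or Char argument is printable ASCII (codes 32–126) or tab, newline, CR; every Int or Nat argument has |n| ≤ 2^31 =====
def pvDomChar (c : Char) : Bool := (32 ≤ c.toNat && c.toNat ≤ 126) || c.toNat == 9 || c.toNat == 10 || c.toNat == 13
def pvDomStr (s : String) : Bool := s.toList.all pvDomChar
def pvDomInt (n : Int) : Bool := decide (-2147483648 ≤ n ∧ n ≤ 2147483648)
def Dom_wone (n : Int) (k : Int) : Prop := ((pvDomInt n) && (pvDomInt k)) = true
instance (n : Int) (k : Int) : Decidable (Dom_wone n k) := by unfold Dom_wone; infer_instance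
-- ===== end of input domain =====

-- B replaces A's subtract-one-at-a-time loop with the O(1) closed form s = n % |k|; cnt = s + (n-s)//k.

-- (n-1) % m steps down by one while n % m ≠ 0 (m > 0); cited by woneLoop's termination proof.
lemma emod_pred (n m : Int) (hm : 0 < m) (hne : n % m ≠ 0) : (n - 1) % m = n % m - 1 := by
  have h1 : 0 ≤ n % m := Int.emod_nonneg n (by omega)
  have h2 : n % m < m := Int.emod_lt_of_pos n hm
  have hm2 : 2 ≤ m := by
    rcases (by omega : m = 1 ∨ 2 ≤ m) with h | h
    · subst h; simp at hne
    · exact h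
  have hone : (1:Int) % m = 1 := Int.emod_eq_of_lt (by omega) (by omega)
  rw [Int.sub_emod, hone, Int.emod_eq_of_lt (by omega) (by omega)]

-- ===== PORT A =====
-- A's while-True loop: decrement n and count until n % k == 0, then add n // k.
-- The 'k = 0' guard only makes the recursion total (Python raises ZeroDivisionError there; excluded by Pre_).
def woneLoop (n : Int) (k : Int) (cnt : Int) : Int :=
  if _hk : k = 0 then 0
  else if PySem.Int.mod n k = 0 then cnt + PySem.Int.floordiv n k
  else woneLoop (n - 1) k (cnt + 1)
  termination_by (n % (k.natAbs : Int)).toNat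
  decreasing_by
    have hk' : (0:Int) < (k.natAbs : Int) := by
      have := Int.natAbs_pos.mpr _hk; exact_mod_cast this
    have h1 : 0 ≤ n % (k.natAbs : Int) := Int.emod_nonneg n (by omega)
    have hne : n % (k.natAbs : Int) ≠ 0 := by
      intro h
      have hdvd : (k.natAbs : Int) ∣ n := Int.dvd_of_emod_eq_zero h
      have : k ∣ n := (Int.natAbs_dvd).mp hdvd
      exact ‹¬ PySem.Int.mod n k = 0› ((PySem.Int.mod_eq_zero_iff_dvd n k).mpr this)
    have h3 : (n - 1) % (k.natAbs : Int) = n % (k.natAbs : Int) - 1 :=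
      emod_pred n _ hk' hne
    omega

def wone (n : Int) (k : Int) : Int := woneLoop n k 0

-- ===== PORT B =====
def wone_alt (n : Int) (k : Int) : Int :=
  let s := PySem.Int.mod n ((k.natAbs : Int))
  s + PySem.Int.floordiv (n - s) k

-- ===== PRECONDITION & SPEC =====
-- Pre_ excludes exactly k = 0, where Python A raises ZeroDivisionError.
def Pre_wone (n : Int) (k : Int) : Prop := k ≠ 0
instance (n : Int) (k : Int) : Decidable (Pre_wone n k) := by unfold Pre_wone; infer_instance
def pvWitness_wone : Int × Int := (17, 4)

def Spec_wone (n : Int) (k : Int) (out : Int) : Prop := out = wone_alt n k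
instance (n : Int) (k : Int) (out : Int) : Decidable (Spec_wone n k out) := by unfold Spec_wone; infer_instance

-- ===== CLAIM (what is proved, stated in full; the proofs are below) =====
def Claim_equal_wone : Prop := ∀ (n : Int) (k : Int), Dom_wone n k → Pre_wone n k → Spec_wone n k (wone n k)

-- ===== LEMMAS AND PROOFS =====

-- When k ∤ n, one decrement lowers both closed-form pieces consistently: B at n equals B at (n-1) plus 1.
lemma wone_alt_pred (n k : Int) (hk : k ≠ 0) (hnd : PySem.Int.mod n k ≠ 0) :
    wone_alt n k = wone_alt (n - 1) k + 1 := by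
  have hk' : (0:Int) < (k.natAbs : Int) := by
    have := Int.natAbs_pos.mpr hk; exact_mod_cast this
  have hm : PySem.Int.mod n ((k.natAbs : Int)) = n % (k.natAbs : Int) :=
    PySem.Int.mod_eq_emod_of_pos hk'
  have hm' : PySem.Int.mod (n - 1) ((k.natAbs : Int)) = (n - 1) % (k.natAbs : Int) :=
    PySem.Int.mod_eq_emod_of_pos hk'
  have h1 : 0 ≤ n % (k.natAbs : Int) := Int.emod_nonneg n (by omega)
  have hne : n % (k.natAbs : Int) ≠ 0 := by
    intro h
    exact hnd ((PySem.Int.mod_eq_zero_iff_dvd n k).mpr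
      ((Int.natAbs_dvd).mp (Int.dvd_of_emod_eq_zero h)))
  have h3 : (n - 1) % (k.natAbs : Int) = n % (k.natAbs : Int) - 1 :=
    emod_pred n _ hk' hne
  simp only [wone_alt, hm, hm', h3]
  have : n - 1 - (n % (k.natAbs : Int) - 1) = n - n % (k.natAbs : Int) := by ring
  rw [this]; ring

-- When k ∣ n, the closed form collapses to n // k.
lemma wone_alt_dvd (n k : Int) (hk : k ≠ 0) (hnd : PySem.Int.mod n k = 0) :
    wone_alt n k = PySem.Int.floordiv n k := by
  have hk' : (0:Int) < (k.natAbs : Int) := by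
    have := Int.natAbs_pos.mpr hk; exact_mod_cast this
  have hdvd : k ∣ n := (PySem.Int.mod_eq_zero_iff_dvd n k).mp hnd
  have hm : PySem.Int.mod n ((k.natAbs : Int)) = n % (k.natAbs : Int) :=
    PySem.Int.mod_eq_emod_of_pos hk'
  have h0 : n % (k.natAbs : Int) = 0 :=
    Int.emod_eq_zero_of_dvd ((Int.natAbs_dvd).mpr hdvd)
  simp only [wone_alt]
  rw [hm, h0]
  simp

-- Loop invariant: the accumulated count plus the closed form of the remaining n is constant.
lemma woneLoop_eq (n k cnt : Int) (hk : k ≠ 0) :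
    woneLoop n k cnt = cnt + wone_alt n k := by
  induction n, cnt using woneLoop.induct k with
  | case1 n cnt h => exact absurd h hk
  | case2 n cnt h hm =>
      rw [woneLoop]; simp [h, hm, wone_alt_dvd n k hk hm]
  | case3 n cnt h hm ih =>
      rw [woneLoop]; simp only [h, hm, dite_eq_ite, if_false]
      rw [ih, wone_alt_pred n k hk hm]; ring

-- ===== VERDICT (by name: the statement is the Claim_ definition above) =====
theorem wone_spec : Claim_equal_wone := by
  intro n k _ hk
  unfold Spec_wone wone
  simpa using woneLoop_eq n k 0 hk
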